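-- pv_equiv track=rewrite | github.com/r7a7d7o/agent-zero-main | plugins/_memory/tools/behaviour_adjustment.py | normalize_ruleset
-- ===== SOURCE A (Python) =====
-- def normalize_ruleset(ruleset: str):
--     text = str(ruleset or "").strip()
--
--     if text.startswith("```") and text.endswith("```"):
--         lines = text.splitlines()
--         text = "\n".join(lines[1:-1]).strip()
--
--     text = text.replace("\r\n", "\n").replace("\r", "\n")
--     text = text.replace("!!!", "")
--     text = text.replace(".## ", ".\n## ")
--
--     normalized_lines = []
--     seen_structural_lines = set()
--     previous_blank = False
--
--     for raw_line in text.splitlines():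
--         line = raw_line.rstrip()
--         stripped = line.strip()
--
--         if not stripped:
--             if normalized_lines and not previous_blank:
--                 normalized_lines.append("")
--             previous_blank = True
--             continue
--
--         if stripped.startswith("# ") and not stripped.startswith("## "):
--             stripped = "#" + stripped
--             line = stripped
--
--         dedupe_key = stripped.casefold()
--         if stripped.startswith(("## ", "* ")) and dedupe_key in seen_structural_lines:
--             continue
--         if stripped.startswith(("## ", "* ")):
--             seen_structural_lines.add(dedupe_key)
--
--         normalized_lines.append(line)
--         previous_blank = False
--
--     return "\n".join(normalized_lines).strip() + "\n"
-- ===== SOURCE B (Python) =====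
-- def normalize_ruleset(ruleset: str):
--     text = str(ruleset or "").strip()
--
--     if text.startswith("```") and text.endswith("```"):
--         lines = text.splitlines()
--         text = "\n".join(lines[1:-1]).strip()
--
--     text = text.replace("\r\n", "\n").replace("\r", "\n")
--     text = text.replace("!!!", "")
--     text = text.replace(".## ", ".\n## ")
--
--     # Stage 1: pure per-line normalization (rstrip + '# ' -> '## ' header fix),
--     # carrying the stripped form alongside each line.
--     def _norm(raw):
--         line = raw.rstrip()
--         s = line.strip()
--         if s.startswith("# ") and not s.startswith("## "):
--             line = "#" + s
--             s = line
--         return line, s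
--
--     pairs = [_norm(raw) for raw in text.splitlines()]
--
--     # Stage 2: drop repeated structural lines (casefolded keys).
--     kept = []
--     seen = set()
--     for line, s in pairs:
--         if s.startswith(("## ", "* ")):
--             k = s.casefold()
--             if k in seen:
--                 continue
--             seen.add(k)
--         kept.append(line)
--
--     # Stage 3: collapse runs of blank lines by comparing neighbours, then strip.
--     sq = kept[:1] + [b for a, b in zip(kept, kept[1:]) if not (a == "" and b == "")]
--     return "\n".join(sq).strip() + "\n"
-- ===== Notes on version B (the rewrite author's own statement) =====
-- stated objective: alternative
-- what changed: A's single stateful loop (previous_blank flag deciding blank emission) is replaced by three staged passes: a pure per-line normalization map producing (line, stripped) pairs, a dedup filter over those pairs, and a zip-neighbour comprehension that collapses blank runs before the final strip.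
import Mathlib
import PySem

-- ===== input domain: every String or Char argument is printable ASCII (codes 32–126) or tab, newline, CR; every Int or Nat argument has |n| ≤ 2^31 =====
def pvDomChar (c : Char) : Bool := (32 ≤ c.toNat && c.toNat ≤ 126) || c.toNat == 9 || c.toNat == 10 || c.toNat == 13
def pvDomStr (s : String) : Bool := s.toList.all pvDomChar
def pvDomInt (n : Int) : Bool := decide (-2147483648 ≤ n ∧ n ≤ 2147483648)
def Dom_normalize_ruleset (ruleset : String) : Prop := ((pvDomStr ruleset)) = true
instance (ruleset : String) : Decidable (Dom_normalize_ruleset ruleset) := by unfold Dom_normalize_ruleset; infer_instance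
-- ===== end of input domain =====

-- B replaces A's single stateful loop (previous_blank flag) by three staged passes:
-- a per-line normalization map, a dedup filter, and a zip-neighbour blank collapse.

-- ===== PORT A =====
-- preprocessing of A (strip, fence removal, the three replaces)
def nrPreA (ruleset : String) : String :=
  let text := PySem.Str.strip ruleset
  let text :=
    if PySem.Str.startswith text "```" && PySem.Str.endswith text "```" then
      PySem.Str.strip (PySem.Str.join "\n"
        (PySem.List.slice (PySem.Str.splitlines text) (some 1) (some (-1))))
    else text
  let text := PySem.Str.replace (PySem.Str.replace text "\r\n" "\n") "\r" "\n"
  let text := PySem.Str.replace text "!!!" ""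
  PySem.Str.replace text ".## " ".\n## "

-- one iteration of A's loop; state = (normalized_lines, seen_structural_lines, previous_blank)
-- (.casefold() is ported as PySem.Str.lower, exact on the printable-ASCII domain Dom_)
def nrStepA (st : List String × PySem.Set String × Bool) (raw : String) :
    List String × PySem.Set String × Bool :=
  let line := PySem.Str.rstrip raw
  let stripped := PySem.Str.strip line
  if stripped = "" then
    ((if !st.1.isEmpty && !st.2.2 then st.1 ++ [""] else st.1), st.2.1, true)
  else
    let fix := PySem.Str.startswith stripped "# " && !PySem.Str.startswith stripped "## "
    let stripped := if fix then "#" ++ stripped else stripped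
    let line := if fix then stripped else line
    let key := PySem.Str.lower stripped
    let structural := PySem.Str.startswith stripped "## " || PySem.Str.startswith stripped "* "
    if structural && PySem.Set.contains st.2.1 key then st
    else (st.1 ++ [line], (if structural then PySem.Set.add st.2.1 key else st.2.1), false)

def normalize_ruleset (ruleset : String) : String :=
  let st := (PySem.Str.splitlines (nrPreA ruleset)).foldl nrStepA ([], PySem.Set.empty, false)
  PySem.Str.strip (PySem.Str.join "\n" st.1) ++ "\n"

-- ===== PORT B =====
-- same preprocessing (B's code repeats it verbatim)
def nrPreB (ruleset : String) : String :=
  let text := PySem.Str.strip ruleset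
  let text :=
    if PySem.Str.startswith text "```" && PySem.Str.endswith text "```" then
      PySem.Str.strip (PySem.Str.join "\n"
        (PySem.List.slice (PySem.Str.splitlines text) (some 1) (some (-1))))
    else text
  let text := PySem.Str.replace (PySem.Str.replace text "\r\n" "\n") "\r" "\n"
  let text := PySem.Str.replace text "!!!" ""
  PySem.Str.replace text ".## " ".\n## "

-- stage 1: pure per-line normalization, returning (line, stripped)
def nrNorm (raw : String) : String × String :=
  let line := PySem.Str.rstrip raw
  let s := PySem.Str.strip line
  if PySem.Str.startswith s "# " && !PySem.Str.startswith s "## " then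
    ("#" ++ s, "#" ++ s)
  else (line, s)

-- stage 2: drop repeated structural lines (casefold ported as lower, exact on Dom_)
def nrDedup : List (String × String) → PySem.Set String → List String
  | [], _ => []
  | p :: t, seen =>
    if PySem.Str.startswith p.2 "## " || PySem.Str.startswith p.2 "* " then
      let k := PySem.Str.lower p.2
      if PySem.Set.contains seen k then nrDedup t seen
      else p.1 :: nrDedup t (PySem.Set.add seen k)
    else p.1 :: nrDedup t seen

def normalize_ruleset_alt (ruleset : String) : String :=
  let pairs := (PySem.Str.splitlines (nrPreB ruleset)).map nrNorm
  let kept := nrDedup pairs PySem.Set.empty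
  -- stage 3: kept[:1] + [b for a, b in zip(kept, kept[1:]) if not (a == "" and b == "")]
  let sq := kept.take 1 ++
    (kept.zip kept.tail).filterMap
      (fun p => if p.1 = "" && p.2 = "" then none else some p.2)
  PySem.Str.strip (PySem.Str.join "\n" sq) ++ "\n"

-- ===== PRECONDITION & SPEC =====
def Spec_normalize_ruleset (ruleset : String) (out : String) : Prop := out = normalize_ruleset_alt ruleset
instance (ruleset : String) (out : String) : Decidable (Spec_normalize_ruleset ruleset out) := by unfold Spec_normalize_ruleset; infer_instance

-- ===== CLAIM =====
def Claim_equal_normalize_ruleset : Prop := ∀ (ruleset : String), Dom_normalize_ruleset ruleset → Spec_normalize_ruleset ruleset (normalize_ruleset ruleset)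

-- ===== LEMMAS AND PROOFS =====

-- the stream of lines A's loop would emit if every blank produced "" (blank policy factored out)
def nrEmit : List String → PySem.Set String → List String
  | [], _ => []
  | raw :: t, seen =>
    let line := PySem.Str.rstrip raw
    let stripped := PySem.Str.strip line
    if stripped = "" then "" :: nrEmit t seen
    else
      let fix := PySem.Str.startswith stripped "# " && !PySem.Str.startswith stripped "## "
      let stripped := if fix then "#" ++ stripped else stripped
      let line := if fix then stripped else line
      let key := PySem.Str.lower stripped
      let structural := PySem.Str.startswith stripped "## " || PySem.Str.startswith stripped "* "
      if structural && PySem.Set.contains seen key then nrEmit t seen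
      else line :: nrEmit t (if structural then PySem.Set.add seen key else seen)

-- A's blank policy applied to the emitted stream: b = "a blank may be emitted here"
def nrSq : Bool → List String → List String
  | _, [] => []
  | b, s :: t => if s = "" then (if b then "" :: nrSq false t else nrSq false t) else s :: nrSq true t

lemma nr_isEmpty_append (a : List String) (x : String) : (a ++ [x]).isEmpty = false := by
  simp

lemma nrFoldA (ls : List String) : ∀ a seen pb,
    (ls.foldl nrStepA (a, seen, pb)).1 = a ++ nrSq (!a.isEmpty && !pb) (nrEmit ls seen) := by
  induction ls with
  | nil => intro a seen pb; simp [nrEmit, nrSq]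
  | cons raw t ih =>
    intro a seen pb
    simp only [List.foldl_cons, nrStepA, nrEmit]
    by_cases hb : PySem.Str.strip (PySem.Str.rstrip raw) = ""
    · simp only [hb, if_true]
      rw [ih]
      by_cases hc : (!a.isEmpty && !pb) = true
      · simp [nrSq, hc, List.append_assoc]
      · have hc' : (!a.isEmpty && !pb) = false := by revert hc; cases (!a.isEmpty && !pb) <;> simp
        simp [nrSq, hc']
    · have hl1 : "#" ++ PySem.Str.strip (PySem.Str.rstrip raw) ≠ "" := by
        intro h
        have := congrArg String.toList h
        simp [String.toList_append] at this
      have hl2 : PySem.Str.rstrip raw ≠ "" := by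
        intro h
        apply hb
        rw [h]
        rfl
      simp only [hb, reduceIte]
      split_ifs <;> rw [ih] <;>
        simp [nrSq, hl1, hl2, List.append_assoc, nr_isEmpty_append]

-- rstrip-related char facts, used to show an all-blank line normalizes to ""
lemma nr_dropWhile_self {p : Char → Bool} {l : List Char} :
    List.dropWhile p (List.dropWhile p l) = List.dropWhile p l := by
  cases h : List.dropWhile p l with
  | nil => rfl
  | cons a t =>
    have ha : p a = false := by
      have := List.head_dropWhile_not p (l := l) (by simp [h])
      simpa [h] using this
    simp [ha]

lemma nr_rstrip_idem (u : List Char) :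
    PySem.Chars.rstrip (PySem.Chars.rstrip u) = PySem.Chars.rstrip u := by
  simp [PySem.Chars.rstrip, nr_dropWhile_self]

lemma nr_rstrip_nil_iff (u : List Char) :
    PySem.Chars.rstrip u = [] ↔ ∀ c ∈ u, PySem.Chars.isspace c = true := by
  simp only [PySem.Chars.rstrip]
  rw [List.reverse_eq_nil_iff, List.dropWhile_eq_nil_iff]
  simp [List.mem_reverse]

lemma nr_strip_nil (u : List Char) (h : PySem.Chars.strip u = [])
    (hr : PySem.Chars.rstrip u = u) : u = [] := by
  have hs : PySem.Chars.rstrip (PySem.Chars.lstrip u) = [] := h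
  have hall : ∀ c ∈ PySem.Chars.lstrip u, PySem.Chars.isspace c = true :=
    (nr_rstrip_nil_iff _).mp hs
  have hnil : PySem.Chars.lstrip u = [] := by
    cases hl : PySem.Chars.lstrip u with
    | nil => rfl
    | cons a t =>
      have hd : List.dropWhile PySem.Chars.isspace u = a :: t := hl
      have ha : PySem.Chars.isspace a = false := by
        have h3 := List.head_dropWhile_not PySem.Chars.isspace (l := u) (by simp [hd])
        simpa [hd] using h3
      have := hall a (by rw [hl]; exact List.mem_cons_self)
      rw [ha] at this; exact absurd this (by simp)
  have hall' : ∀ c ∈ u, PySem.Chars.isspace c = true :=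
    List.dropWhile_eq_nil_iff.mp hnil
  rw [← hr]
  exact (nr_rstrip_nil_iff u).mpr hall'

-- if a line has no trailing whitespace and strips to "", it is already ""
lemma nr_rstrip_empty_of_strip (raw : String)
    (h : PySem.Str.strip (PySem.Str.rstrip raw) = "") : PySem.Str.rstrip raw = "" := by
  have h1 : PySem.Chars.strip (PySem.Chars.rstrip raw.toList) = [] := by
    have := congrArg String.toList h
    simpa [PySem.Str.toList_strip, PySem.Str.toList_rstrip] using this
  have h2 : (PySem.Str.rstrip raw).toList = [] := by
    rw [PySem.Str.toList_rstrip]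
    exact nr_strip_nil _ h1 (nr_rstrip_idem _)
  have := congrArg String.ofList h2
  rwa [String.ofList_toList] at this

-- stage 1 + stage 2 of B compute exactly the emitted stream
lemma nrMapDedup (ls : List String) : ∀ seen,
    nrDedup (ls.map nrNorm) seen = nrEmit ls seen := by
  induction ls with
  | nil => intro seen; simp [nrDedup, nrEmit]
  | cons raw t ih =>
    intro seen
    by_cases hb : PySem.Str.strip (PySem.Str.rstrip raw) = ""
    · have hline := nr_rstrip_empty_of_strip raw hb
      have hn : nrNorm raw = ("", "") := by
        simp only [nrNorm, hline]
        decide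
      have hst : (PySem.Str.startswith "" "## " || PySem.Str.startswith "" "* ") = false := by
        decide
      simp only [List.map_cons, hn, nrDedup, nrEmit, hb, if_true, hst, Bool.false_eq_true,
        reduceIte]
      rw [ih]
    · simp only [List.map_cons, nrDedup, nrEmit, nrNorm, hb, reduceIte]
      split_ifs <;> simp_all

-- stage 3 of B, after peeling zip/filterMap into a neighbour recursion
def nrPairs : String → List String → List String
  | _, [] => []
  | a, b :: t => if a = "" && b = "" then nrPairs b t else b :: nrPairs b t

lemma nrZip (t : List String) : ∀ a : String,
    ((a :: t).zip t).filterMap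
        (fun p => if p.1 = "" && p.2 = "" then none else some p.2) = nrPairs a t := by
  induction t with
  | nil => intro a; simp [nrPairs]
  | cons b t' ih =>
    intro a
    simp only [List.zip_cons_cons, List.filterMap_cons, nrPairs]
    split_ifs with h <;> simp_all

lemma nrPairs_eq_nrSq (t : List String) : ∀ s : String,
    nrPairs s t = nrSq (!(s == "")) t := by
  induction t with
  | nil => intro s; simp [nrPairs, nrSq]
  | cons b t' ih =>
    intro s
    by_cases hb : b = ""
    · subst hb
      by_cases hs : s = ""
      · subst hs; simp [nrPairs, nrSq, ih]
      · have hbe : (s == "") = false := beq_eq_false_iff_ne.mpr hs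
        simp [nrPairs, nrSq, hs, hbe, ih]
    · have hbe : (b == "") = false := beq_eq_false_iff_ne.mpr hb
      simp [nrPairs, nrSq, hb, hbe, ih]

-- B's squeezed list is A's blank policy started with the blank-allowed flag
lemma nrSqueeze_eq (K : List String) :
    K.take 1 ++ (K.zip K.tail).filterMap
        (fun p => if p.1 = "" && p.2 = "" then none else some p.2) = nrSq true K := by
  cases K with
  | nil => simp [nrSq]
  | cons c t =>
    simp only [List.take_succ_cons, List.take_zero, List.tail_cons, nrZip, nrPairs_eq_nrSq]
    by_cases hc : c = ""
    · subst hc; simp [nrSq]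
    · have hbe : (c == "") = false := beq_eq_false_iff_ne.mpr hc
      simp [nrSq, hc, hbe]

lemma nr_isspace_nl : PySem.Chars.isspace '\n' = true := by decide

lemma nr_strip_nl_cons (s : List Char) :
    PySem.Chars.strip ('\n' :: s) = PySem.Chars.strip s := by
  simp only [PySem.Chars.strip, PySem.Chars.lstrip, List.dropWhile_cons, nr_isspace_nl]
  rfl

-- joins differing only in one leading blank line agree after strip
lemma nr_strip_join_blank_cons (X : List String) :
    PySem.Str.strip (PySem.Str.join "\n" ("" :: X)) =
      PySem.Str.strip (PySem.Str.join "\n" X) := by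
  cases X with
  | nil => rfl
  | cons d t' =>
    simp only [PySem.Str.strip]
    refine congrArg String.ofList ?_
    rw [PySem.Str.toList_join, PySem.Str.toList_join]
    have hsl : ("\n" : String).toList = ['\n'] := rfl
    rw [hsl]
    have h2 : PySem.Chars.join ['\n'] (List.map String.toList ("" :: d :: t'))
        = '\n' :: PySem.Chars.join ['\n'] (List.map String.toList (d :: t')) := by
      show PySem.Chars.join ['\n'] ([] :: String.toList d :: List.map String.toList t') = _
      rw [PySem.Chars.join_cons_cons]
      rfl
    rw [h2, nr_strip_nl_cons]

-- the two blank policies differ at most in one leading blank, which strip removes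
lemma nrStrip_join_sq (E : List String) :
    PySem.Str.strip (PySem.Str.join "\n" (nrSq true E)) =
      PySem.Str.strip (PySem.Str.join "\n" (nrSq false E)) := by
  cases E with
  | nil => rfl
  | cons c t =>
    by_cases hc : c = ""
    · subst hc
      simp only [nrSq, if_true, Bool.false_eq_true, reduceIte]
      exact nr_strip_join_blank_cons _
    · simp [nrSq, hc]

lemma nrSpecEq (ruleset : String) : normalize_ruleset ruleset = normalize_ruleset_alt ruleset := by
  simp only [normalize_ruleset, normalize_ruleset_alt]
  have hpre : nrPreB ruleset = nrPreA ruleset := rfl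
  rw [hpre, nrFoldA, nrMapDedup, nrSqueeze_eq]
  simp only [List.nil_append, List.isEmpty_nil, Bool.not_true, Bool.false_and]
  rw [nrStrip_join_sq]

-- ===== VERDICT (by name: the statement is the Claim_ definition above) =====
theorem normalize_ruleset_spec : Claim_equal_normalize_ruleset := by
  intro ruleset _
  exact nrSpecEq ruleset
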